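-- pv_equiv track=rewrite | github.com/morteza404/python_scripts | enum_test.py | have_quorum
-- ===== SOURCE A (Python) =====
-- HTTP_OK = 200
--
-- HTTP_MULTIPLE_CHOICES = 300
--
-- HTTP_BAD_REQUEST = 400
--
-- HTTP_CONTINUE = 100
--
-- def have_quorum(statuses, quorum=None):
--         """
--         Given a list of statuses from several requests, determine if
--         a quorum response can already be decided.
--
--         :param statuses: list of statuses returned
--         :param node_count: number of nodes being queried (basically ring count)
--         :param quorum: number of statuses required for quorum
--         :returns: True or False, depending on if quorum is established
--         """
--         if quorum is None:
--             quorum = 2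
--         if len(statuses) >= quorum:
--             for hundred in (HTTP_CONTINUE, HTTP_OK, HTTP_MULTIPLE_CHOICES,
--                             HTTP_BAD_REQUEST):
--                 if sum(1 for s in statuses
--                        if hundred <= s < hundred + 100) >= quorum:
--                     return True
--         return False
--
-- statuses = [404, 404, 404, 404]
-- ===== SOURCE B (Python) =====
-- def have_quorum(statuses, quorum=None):
--     if quorum is None:
--         quorum = 2
--     if len(statuses) < quorum:
--         return False
--     counts = {}
--     for s in statuses:
--         h = s // 100
--         counts[h] = counts.get(h, 0) + 1
--     return any(counts.get(h, 0) >= quorum for h in (1, 2, 3, 4))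
-- ===== Notes on version B (the rewrite author's own statement) =====
-- stated objective: alternative
-- what changed: Replaces four repeated scans of statuses (one per HTTP bucket) with a single tallying pass keyed by s // 100 plus four table lookups; measured cost is similar.
import Mathlib
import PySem

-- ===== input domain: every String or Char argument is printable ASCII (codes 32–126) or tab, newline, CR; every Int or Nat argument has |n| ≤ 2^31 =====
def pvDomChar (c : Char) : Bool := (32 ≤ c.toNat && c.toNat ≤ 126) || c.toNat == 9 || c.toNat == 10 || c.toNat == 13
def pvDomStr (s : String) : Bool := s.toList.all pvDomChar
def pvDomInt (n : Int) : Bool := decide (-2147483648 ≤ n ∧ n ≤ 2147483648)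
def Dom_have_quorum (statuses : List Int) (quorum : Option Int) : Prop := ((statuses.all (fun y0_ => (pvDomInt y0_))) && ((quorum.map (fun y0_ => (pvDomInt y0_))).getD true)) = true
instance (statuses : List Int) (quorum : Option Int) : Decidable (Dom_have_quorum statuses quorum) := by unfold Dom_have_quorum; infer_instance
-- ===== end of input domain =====

-- B replaces A's four per-bucket scans of statuses with one tallying pass over statuses
-- keyed by s // 100 plus four table lookups (objective: alternative; similar measured cost).
-- ===== PORT A =====
def have_quorum (statuses : List Int) (quorum : Option Int) : Bool :=
  let q : Int := quorum.getD 2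
  if (statuses.length : Int) ≥ q then
    ([100, 200, 300, 400] : List Int).any (fun hundred =>
      statuses.foldl (fun acc s =>
        if hundred ≤ s ∧ s < hundred + 100 then acc + 1 else acc) (0 : Int) ≥ q)
  else false

-- ===== PORT B =====
def have_quorum_alt (statuses : List Int) (quorum : Option Int) : Bool :=
  let q : Int := quorum.getD 2
  if (statuses.length : Int) < q then false
  else
    let counts : PySem.Dict Int Int :=
      statuses.foldl (fun d s =>
        let h := PySem.Int.floordiv s 100
        d.insert h (d.getD h 0 + 1)) PySem.Dict.empty
    ([1, 2, 3, 4] : List Int).any (fun h => counts.getD h 0 ≥ q)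

-- ===== PRECONDITION & SPEC =====
def Spec_have_quorum (statuses : List Int) (quorum : Option Int) (out : Bool) : Prop := out = have_quorum_alt statuses quorum
instance (statuses : List Int) (quorum : Option Int) (out : Bool) : Decidable (Spec_have_quorum statuses quorum out) := by unfold Spec_have_quorum; infer_instance

-- ===== CLAIM (what is proved, stated in full; the proofs are below) =====
def Claim_equal_have_quorum : Prop := ∀ (statuses : List Int) (quorum : Option Int), Dom_have_quorum statuses quorum → Spec_have_quorum statuses quorum (have_quorum statuses quorum)

-- ===== LEMMAS AND PROOFS =====

-- ===== VERDICT (by name: the statement is the Claim_ definition above) =====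
-- the counting loop of B, read through getD: a bucket count
lemma alt_counts_getD (statuses : List Int) (h : Int) :
    (statuses.foldl (fun d s =>
        let k := PySem.Int.floordiv s 100
        d.insert k (d.getD k 0 + 1)) (PySem.Dict.empty : PySem.Dict Int Int)).getD h 0
      = ((statuses.map (fun s => PySem.Int.floordiv s 100)).count h : Int) := by
  rw [show (statuses.foldl (fun d s =>
        let k := PySem.Int.floordiv s 100
        d.insert k (d.getD k 0 + 1)) (PySem.Dict.empty : PySem.Dict Int Int))
      = ((statuses.map (fun s => PySem.Int.floordiv s 100)).foldl
          (fun d k => d.insert k (d.getD k 0 + 1)) PySem.Dict.empty)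
      from by simp only [List.foldl_map]]
  rw [PySem.Dict.getD_foldl_insert_add_one]
  simp

-- A's per-bucket counting loop is a countP
lemma a_count (statuses : List Int) (hundred : Int) :
    statuses.foldl (fun acc s =>
      if hundred ≤ s ∧ s < hundred + 100 then acc + 1 else acc) (0 : Int)
    = (statuses.countP (fun s => decide (hundred ≤ s ∧ s < hundred + 100)) : Int) := by
  suffices H : ∀ (c : Int), statuses.foldl (fun acc s =>
      if hundred ≤ s ∧ s < hundred + 100 then acc + 1 else acc) c
      = c + (statuses.countP (fun s => decide (hundred ≤ s ∧ s < hundred + 100)) : Int) by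
    simpa using H 0
  induction statuses with
  | nil => simp
  | cons x xs ih =>
    intro c
    by_cases hx : hundred ≤ x ∧ x < hundred + 100 <;> simp [hx, ih] <;> ring

-- the bucket condition is exactly s // 100 = h (for the four positive buckets)
lemma bucket_iff (s h : Int) :
    (decide (100 * h ≤ s ∧ s < 100 * h + 100)) = (PySem.Int.floordiv s 100 == h) := by
  rw [PySem.Int.floordiv_eq_ediv_of_pos (by norm_num)]
  by_cases hb : 100 * h ≤ s ∧ s < 100 * h + 100 <;> simp [hb] <;> omega

lemma count_bucket (statuses : List Int) (h : Int) :
    (statuses.countP (fun s => decide (100 * h ≤ s ∧ s < 100 * h + 100)))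
      = (statuses.map (fun s => PySem.Int.floordiv s 100)).count h := by
  rw [show (statuses.map (fun s => PySem.Int.floordiv s 100)).count h
      = statuses.countP (fun s => PySem.Int.floordiv s 100 == h) from by
    simp only [List.count, List.countP_map]; rfl]
  exact List.countP_congr (fun s _ => by rw [bucket_iff s h])

-- ===== VERDICT (by name: the statement is the Claim_ definition above) =====
theorem have_quorum_spec : Claim_equal_have_quorum := by
  intro statuses quorum _
  unfold Spec_have_quorum have_quorum have_quorum_alt
  set q : Int := quorum.getD 2 with hq
  by_cases hlen : (statuses.length : Int) ≥ q
  · simp only [hlen, if_pos, show ¬ ((statuses.length : Int) < q) by omega, if_neg,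
      not_false_iff]
    simp only [List.any_cons, List.any_nil, a_count, alt_counts_getD]
    have e : ∀ h : Int, (statuses.countP (fun s => decide (100 * h ≤ s ∧ s < 100 * h + 100)) : Int)
        = ((statuses.map (fun s => PySem.Int.floordiv s 100)).count h : Int) := by
      intro h; exact_mod_cast count_bucket statuses h
    have e1 := e 1; have e2 := e 2; have e3 := e 3; have e4 := e 4
    norm_num at e1 e2 e3 e4 ⊢
    rw [e1, e2, e3, e4]
  · simp [if_neg hlen, show (statuses.length : Int) < q by omega]
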